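-- pv_equiv track=rewrite | github.com/cooprefr/bettersys | scripts/generate_calibrated_trades.py | build_snapshots_by_token
-- ===== SOURCE A (Python) =====
-- from typing import Optional, Dict, List, Any, Tuple
--
-- def build_snapshots_by_token(snapshots: List[Dict[str, Any]]) -> Dict[str, List[Dict[str, Any]]]:
--     """Group snapshots by token_id for faster lookup."""
--     by_token: Dict[str, List[Dict[str, Any]]] = {}
--     for snap in snapshots:
--         tid = snap['token_id']
--         if tid not in by_token:
--             by_token[tid] = []
--         by_token[tid].append(snap)
--     return by_token
-- ===== SOURCE B (Python) =====
-- from typing import Dict, List, Any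
--
-- def build_snapshots_by_token(snapshots: List[Dict[str, Any]]) -> Dict[str, List[Dict[str, Any]]]:
--     """Group snapshots by token_id: dedup the keys first, then gather each group."""
--     keys = list(dict.fromkeys(snap['token_id'] for snap in snapshots))
--     return {tid: [snap for snap in snapshots if snap['token_id'] == tid] for tid in keys}
-- ===== Notes on version B (the rewrite author's own statement) =====
-- stated objective: alternative
-- what changed: Replaces the single-pass incremental dict mutation (insert-empty-then-append per snapshot) with a two-phase scheme: dedup the token ids once, then build each group with a filter comprehension.
import Mathlib
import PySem

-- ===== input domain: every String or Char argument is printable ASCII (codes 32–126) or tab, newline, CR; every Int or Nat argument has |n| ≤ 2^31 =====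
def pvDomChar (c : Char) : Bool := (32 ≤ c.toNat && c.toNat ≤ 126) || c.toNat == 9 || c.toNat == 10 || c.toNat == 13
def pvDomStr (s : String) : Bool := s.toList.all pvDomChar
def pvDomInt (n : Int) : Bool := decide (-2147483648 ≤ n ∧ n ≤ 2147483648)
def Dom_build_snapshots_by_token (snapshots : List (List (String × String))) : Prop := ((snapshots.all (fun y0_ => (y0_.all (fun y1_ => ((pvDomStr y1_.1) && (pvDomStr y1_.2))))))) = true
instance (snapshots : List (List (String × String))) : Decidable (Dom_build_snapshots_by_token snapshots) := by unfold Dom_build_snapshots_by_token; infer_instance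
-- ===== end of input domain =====

-- B groups by deduplicating the token ids once, then filtering the list per id,
-- instead of A's single pass that mutates the dict snapshot by snapshot (return values agree; no mutation observable).

-- ===== PORT A =====
-- loop body of A's `for snap in snapshots` (named so the proofs can refer to it)
def pvStepA (by_token : PySem.Dict String (List (List (String × String))))
    (snap : List (String × String)) : PySem.Dict String (List (List (String × String))) :=
  let tid := ((PySem.Dict.mk snap).get? "token_id").getD ""   -- snap['token_id'] (Pre_ guarantees the key is present)
  let by_token := if by_token.contains tid then by_token else by_token.insert tid []
  by_token.modify tid [] (fun l => l ++ [snap])               -- by_token[tid].append(snap)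

def build_snapshots_by_token (snapshots : List (List (String × String))) : List (String × List (List (String × String))) :=
  (snapshots.foldl pvStepA (PySem.Dict.mk [])).items

-- ===== PORT B =====
-- snap['token_id'] (Pre_ guarantees the key is present)
def pvTid (snap : List (String × String)) : String :=
  ((PySem.Dict.mk snap).get? "token_id").getD ""

def build_snapshots_by_token_alt (snapshots : List (List (String × String))) : List (String × List (List (String × String))) :=
  let keys := PySem.List.dedup (snapshots.map pvTid)          -- list(dict.fromkeys(...))
  keys.map (fun tid => (tid, snapshots.filter (fun snap => pvTid snap == tid)))

-- ===== PRECONDITION & SPEC =====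
-- Pre_ excludes exactly the inputs where some snapshot lacks the 'token_id' key: there Python A raises KeyError (so does B).
def Pre_build_snapshots_by_token (snapshots : List (List (String × String))) : Prop :=
  snapshots.all (fun snap => (((PySem.Dict.mk snap).get? "token_id").isSome : Bool)) = true
instance (snapshots : List (List (String × String))) : Decidable (Pre_build_snapshots_by_token snapshots) := by unfold Pre_build_snapshots_by_token; infer_instance

def pvWitness_build_snapshots_by_token : (List (List (String × String))) :=
  [[("token_id", "x"), ("p", "1")], [("token_id", "y")], [("token_id", "x"), ("p", "2")]]

def Spec_build_snapshots_by_token (snapshots : List (List (String × String))) (out : List (String × List (List (String × String)))) : Prop := out = build_snapshots_by_token_alt snapshots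
instance (snapshots : List (List (String × String))) (out : List (String × List (List (String × String)))) : Decidable (Spec_build_snapshots_by_token snapshots out) := by unfold Spec_build_snapshots_by_token; infer_instance

-- ===== CLAIM (what is proved, stated in full; the proofs are below) =====
def Claim_equal_build_snapshots_by_token : Prop := ∀ (snapshots : List (List (String × String))), Dom_build_snapshots_by_token snapshots → Pre_build_snapshots_by_token snapshots → Spec_build_snapshots_by_token snapshots (build_snapshots_by_token snapshots)

-- ===== LEMMAS AND PROOFS =====

-- B's result, as a function of any prefix of the input (the loop invariant's shape)
def pvGrp (xs : List (List (String × String))) : List (String × List (List (String × String))) :=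
  (PySem.List.dedup (xs.map pvTid)).map (fun t => (t, xs.filter (fun s => pvTid s == t)))

theorem pv_dedup_append_singleton (l : List String) (x : String) :
    PySem.List.dedup (l ++ [x]) =
      if x ∈ l then PySem.List.dedup l else PySem.List.dedup l ++ [x] := by
  have h1 : PySem.List.dedup (l ++ [x]) = PySem.Set.add (PySem.List.dedup l) x := by
    simp [PySem.List.dedup, PySem.Set.ofList, List.foldl_append]
  rw [h1, PySem.Set.add]
  have hmem : PySem.Set.contains (PySem.List.dedup l) x = true ↔ x ∈ l := by
    simp [PySem.Set.contains]
  simp only [hmem]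

theorem pv_contains_grp (pre : List (List (String × String))) (t : String) :
    (PySem.Dict.mk (pvGrp pre)).contains t = true ↔ t ∈ pre.map pvTid := by
  simp [PySem.Dict.contains, pvGrp, List.any_eq_true]

theorem pv_find_map_key (x : String) (K : List String)
    (f : String → List (List (String × String))) (hx : x ∈ K) :
    List.find? (fun p => p.1 == x) (K.map (fun t => (t, f t))) = some (x, f x) := by
  induction K with
  | nil => simp at hx
  | cons a K ih =>
    by_cases ha : a = x
    · subst ha; simp
    · have hbe : ((a, f a).1 == x) = false := by simp [ha]
      rw [List.map_cons, List.find?_cons, hbe]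
      refine ih ?_
      rcases List.mem_cons.mp hx with h | h
      · exact absurd h.symm ha
      · exact h

theorem pv_stepA_grp (pre : List (List (String × String))) (s : List (String × String)) :
    pvStepA (PySem.Dict.mk (pvGrp pre)) s = PySem.Dict.mk (pvGrp (pre ++ [s])) := by
  by_cases hmem : pvTid s ∈ pre.map pvTid
  · -- key already present: step is a pure modify
    have hc : (PySem.Dict.mk (pvGrp pre)).contains (pvTid s) = true :=
      (pv_contains_grp pre (pvTid s)).mpr hmem
    have hget : (PySem.Dict.mk (pvGrp pre)).getD (pvTid s) [] =
        pre.filter (fun q => pvTid q == pvTid s) := by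
      simp only [PySem.Dict.getD, PySem.Dict.get?, pvGrp]
      rw [pv_find_map_key (pvTid s) _ _ ((PySem.List.mem_dedup _ _).mpr hmem)]
      rfl
    show PySem.Dict.modify
        (if (PySem.Dict.mk (pvGrp pre)).contains (((PySem.Dict.mk s).get? "token_id").getD "")
         then PySem.Dict.mk (pvGrp pre)
         else (PySem.Dict.mk (pvGrp pre)).insert (((PySem.Dict.mk s).get? "token_id").getD "") [])
        (((PySem.Dict.mk s).get? "token_id").getD "") [] (fun l => l ++ [s]) = _
    have htid : ((PySem.Dict.mk s).get? "token_id").getD "" = pvTid s := rfl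
    rw [htid, if_pos hc, PySem.Dict.modify, hget, PySem.Dict.insert, if_pos hc]
    congr 1
    simp only [pvGrp, List.map_append, List.map_cons, List.map_nil, pv_dedup_append_singleton,
      hmem, if_pos, List.map_map, List.filter_append]
    apply List.map_congr_left
    intro t _
    by_cases ht : t = pvTid s
    · subst ht; simp [Function.comp, List.filter]
    · have h1 : (t == pvTid s) = false := by simp [ht]
      have h2 : (pvTid s == t) = false := beq_eq_false_iff_ne.mpr (Ne.symm ht)
      simp [Function.comp, h1, List.filter, h2]
  · -- new key: insert an empty group, then the modify appends the fresh entry at the end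
    have hc : ¬ (PySem.Dict.mk (pvGrp pre)).contains (pvTid s) = true :=
      fun h => hmem ((pv_contains_grp pre (pvTid s)).mp h)
    have hnotin : ∀ t ∈ PySem.List.dedup (pre.map pvTid), (t == pvTid s) = false := by
      intro t htK
      have ht : t ∈ pre.map pvTid := (PySem.List.mem_dedup _ _).mp htK
      exact beq_eq_false_iff_ne.mpr (fun h => hmem (h ▸ ht))
    show PySem.Dict.modify
        (if (PySem.Dict.mk (pvGrp pre)).contains (((PySem.Dict.mk s).get? "token_id").getD "")
         then PySem.Dict.mk (pvGrp pre)
         else (PySem.Dict.mk (pvGrp pre)).insert (((PySem.Dict.mk s).get? "token_id").getD "") [])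
        (((PySem.Dict.mk s).get? "token_id").getD "") [] (fun l => l ++ [s]) = _
    have htid : ((PySem.Dict.mk s).get? "token_id").getD "" = pvTid s := rfl
    rw [htid, if_neg hc]
    have hins : (PySem.Dict.mk (pvGrp pre)).insert (pvTid s) [] =
        PySem.Dict.mk (pvGrp pre ++ [(pvTid s, [])]) := by
      rw [PySem.Dict.insert, if_neg hc]
    rw [hins, PySem.Dict.modify]
    have hfindnone : (pvGrp pre).find? (fun p => p.1 == pvTid s) = none := by
      rw [List.find?_eq_none]
      intro p hp
      simp only [pvGrp, List.mem_map] at hp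
      obtain ⟨t, htK, rfl⟩ := hp
      simpa using hnotin t htK
    have hget2 : (PySem.Dict.mk (pvGrp pre ++ [(pvTid s, [])])).getD (pvTid s) [] =
        ([] : List (List (String × String))) := by
      simp [PySem.Dict.getD, PySem.Dict.get?, List.find?_append, hfindnone, List.find?]
    rw [hget2, PySem.Dict.insert]
    have hc2 : (PySem.Dict.mk (pvGrp pre ++ [(pvTid s, [])])).contains (pvTid s) = true := by
      simp [PySem.Dict.contains]
    rw [if_pos hc2]
    congr 1
    rw [List.map_append]
    have hmap1 : (pvGrp pre).map
        (fun p => if p.1 == pvTid s then (pvTid s, [] ++ [s]) else p) = pvGrp pre := by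
      simp only [pvGrp, List.map_map]
      apply List.map_congr_left
      intro t htK
      simp [Function.comp, hnotin t htK]
    rw [hmap1]
    have hfilnil : pre.filter (fun q => pvTid q == pvTid s) = [] := by
      rw [List.filter_eq_nil_iff]
      intro q hq
      have hqm : pvTid q ∈ pre.map pvTid := List.mem_map.mpr ⟨q, hq, rfl⟩
      by_cases h : pvTid q = pvTid s
      · exact absurd (by rwa [h] at hqm) hmem
      · simp [h]
    simp only [pvGrp, List.map_append, List.map_cons, List.map_nil, pv_dedup_append_singleton,
      List.filter_append]
    rw [if_neg hmem, List.map_append, List.map_cons, List.map_nil]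
    congr 1
    · apply List.map_congr_left
      intro t htK
      have h2 : (pvTid s == t) = false :=
        beq_eq_false_iff_ne.mpr (Ne.symm (beq_eq_false_iff_ne.mp (hnotin t htK)))
      simp [List.filter, h2]
    · simp [List.filter, hfilnil]

theorem pv_foldl_grp (rest pre : List (List (String × String))) :
    rest.foldl pvStepA (PySem.Dict.mk (pvGrp pre)) = PySem.Dict.mk (pvGrp (pre ++ rest)) := by
  induction rest generalizing pre with
  | nil => simp
  | cons s rest ih =>
    simp only [List.foldl_cons, pv_stepA_grp]
    rw [ih (pre ++ [s])]
    simp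

-- ===== VERDICT (by name: the statement is the Claim_ definition above) =====
theorem build_snapshots_by_token_spec : Claim_equal_build_snapshots_by_token := by
  intro snapshots _ _
  unfold Spec_build_snapshots_by_token
  show (snapshots.foldl pvStepA (PySem.Dict.mk [])).items = _
  have h0 : (PySem.Dict.mk ([] : List (String × List (List (String × String))))) =
      PySem.Dict.mk (pvGrp []) := rfl
  rw [h0, pv_foldl_grp]
  rfl
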